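-- pv_equiv track=rewrite | github.com/a-BugBaker/stg_llm | data_process/处理1.py | build_label_to_indices
-- ===== SOURCE A (Python) =====
-- from collections import defaultdict
-- from typing import Dict, List, Tuple, Any
--
-- def generate_tag(label: str, count: int, total: int) -> str:
--     """
--     生成对象的tag
--
--     Args:
--         label: 对象的标签
--         count: 当前是该标签的第几个实例（从1开始）
--         total: 该标签总共有多少个实例
--
--     Returns:
--         tag字符串，如果只有一个实例则不加数字
--     """
--     if total == 1:
--         return label
--     return f"{label}{count}"
--
-- def build_label_to_indices(labels: List[str]) -> Tuple[Dict[str, List[int]], Dict[int, str]]: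
--     """
--     构建标签到索引的映射，以及索引到tag的映射
--
--     Args:
--         labels: 标签列表
--
--     Returns:
--         - label_indices: 标签 -> 该标签对应的所有idx列表
--         - idx_to_tag: idx -> 对应的tag
--     """
--     # 统计每个标签出现的次数和对应的索引
--     label_indices = defaultdict(list)
--     for idx, label in enumerate(labels):
--         label_indices[label].append(idx)
--
--     # 为每个idx分配tag
--     idx_to_tag = {}
--     for label, indices in label_indices.items():
--         total = len(indices)
--         for count, idx in enumerate(indices, start=1):
--             idx_to_tag[idx] = generate_tag(label, count, total)
--
--     return dict(label_indices), idx_to_tag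
-- ===== SOURCE B (Python) =====
-- def generate_tag(label: str, count: int, total: int) -> str:
--     if total == 1:
--         return label
--     return f"{label}{count}"
--
--
-- def build_label_to_indices(labels):
--     # Different decomposition: ordered-dedup of the labels first, then one
--     # filtering pass per distinct label builds both mappings in a single loop.
--     distinct = []
--     for lab in labels:
--         if lab not in distinct:
--             distinct.append(lab)
--     label_indices = {}
--     idx_to_tag = {}
--     for lab in distinct:
--         idxs = [i for i, l in enumerate(labels) if l == lab]
--         label_indices[lab] = idxs
--         total = len(idxs)
--         for count, i in enumerate(idxs, start=1):
--             idx_to_tag[i] = generate_tag(lab, count, total)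
--     return label_indices, idx_to_tag
-- ===== Notes on version B (the rewrite author's own statement) =====
-- stated objective: alternative
-- what changed: Replaces A's defaultdict grouping pass plus a second loop over the grouped dict by an ordered dedup of the labels followed by one merged loop over the distinct labels that collects each label's indices with a filtering scan and assigns tags in the same loop; this trades A's O(n) grouping for one scan per distinct label.
import Mathlib
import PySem

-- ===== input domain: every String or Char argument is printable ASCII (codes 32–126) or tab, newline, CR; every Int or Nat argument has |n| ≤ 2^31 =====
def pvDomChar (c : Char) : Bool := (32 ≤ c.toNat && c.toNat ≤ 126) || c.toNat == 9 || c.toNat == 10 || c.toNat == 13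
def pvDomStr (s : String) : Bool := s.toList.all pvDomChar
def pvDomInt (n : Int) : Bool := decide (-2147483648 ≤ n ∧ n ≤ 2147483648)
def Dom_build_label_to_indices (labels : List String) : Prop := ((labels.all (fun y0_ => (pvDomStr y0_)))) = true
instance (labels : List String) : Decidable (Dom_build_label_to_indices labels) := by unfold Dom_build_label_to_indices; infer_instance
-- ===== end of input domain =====

-- B replaces A's defaultdict grouping pass + second loop over the grouped dict by an
-- ordered dedup of the labels and one merged loop that filters each label's indices and
-- assigns tags; alternative decomposition (trades A's O(n) grouping for a scan per
-- distinct label), no speed claim.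

-- ===== PORT A =====
-- shared helper: Python generate_tag (both Source A and Source B define and use it identically)
def generate_tag (label : String) (count : Int) (total : Int) : String :=
  if total == 1 then label else label ++ PySem.Int.toStr count

def build_label_to_indices (labels : List String) : (List (String × List Int)) × (List (Int × String)) :=
  let label_indices : PySem.Dict String (List Int) :=
    (PySem.List.enumerate labels).foldl
      (fun d p => d.modify p.2 [] (fun v => v ++ [p.1])) PySem.Dict.empty
  let idx_to_tag : PySem.Dict Int String :=
    label_indices.items.foldl
      (fun d pr =>
        let total : Int := (pr.2.length : Int)
        (PySem.List.enumerate pr.2 1).foldl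
          (fun d q => d.insert q.2 (generate_tag pr.1 q.1 total)) d)
      PySem.Dict.empty
  (label_indices.items, idx_to_tag.items)

-- ===== PORT B =====
-- port of Source B's comprehension [i for i, l in enumerate(labels) if l == lab]
def pyIdxsOf (labels : List String) (lab : String) : List Int :=
  ((PySem.List.enumerate labels).filter (fun p => p.2 == lab)).map (fun p => p.1)

def build_label_to_indices_alt (labels : List String) : (List (String × List Int)) × (List (Int × String)) :=
  let distinct : PySem.Set String := labels.foldl (fun s lab => s.add lab) PySem.Set.empty
  let st :=
    distinct.foldl
      (fun st lab =>
        let idxs := pyIdxsOf labels lab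
        let total : Int := (idxs.length : Int)
        (st.1.insert lab idxs,
         (PySem.List.enumerate idxs 1).foldl
           (fun d q => d.insert q.2 (generate_tag lab q.1 total)) st.2))
      ((PySem.Dict.empty : PySem.Dict String (List Int)), (PySem.Dict.empty : PySem.Dict Int String))
  (st.1.items, st.2.items)

-- ===== PRECONDITION & SPEC =====
def Spec_build_label_to_indices (labels : List String) (out : (List (String × List Int)) × (List (Int × String))) : Prop := out = build_label_to_indices_alt labels
instance (labels : List String) (out : (List (String × List Int)) × (List (Int × String))) : Decidable (Spec_build_label_to_indices labels out) := by unfold Spec_build_label_to_indices; infer_instance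

-- ===== CLAIM (what is proved, stated in full; the proofs are below) =====
def Claim_equal_build_label_to_indices : Prop := ∀ (labels : List String), Dom_build_label_to_indices labels → Spec_build_label_to_indices labels (build_label_to_indices labels)

-- ===== LEMMAS AND PROOFS =====

-- A's grouping dict, named for the proofs
def groupA (labels : List String) : PySem.Dict String (List Int) :=
  (PySem.List.enumerate labels).foldl
    (fun d p => d.modify p.2 [] (fun v => v ++ [p.1])) PySem.Dict.empty

lemma keys_groupA (labels : List String) :
    (groupA labels).keys = PySem.Set.ofList labels := by
  unfold groupA
  rw [PySem.Dict.keys_foldl_modify_key (PySem.List.enumerate labels) (fun p => p.2) []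
      (fun _ p => (fun v => v ++ [p.1]))]
  simp only [PySem.List.map_snd_enumerate, PySem.Dict.keys_empty]
  exact PySem.Set.update_empty labels

lemma nodup_keys_groupA (labels : List String) : (groupA labels).keys.Nodup := by
  unfold groupA
  exact PySem.Dict.nodup_keys_foldl_modify_key (PySem.List.enumerate labels)
    (fun p => p.2) [] (fun _ p => (fun v => v ++ [p.1])) PySem.Dict.empty
    (by rw [PySem.Dict.keys_empty]; exact List.nodup_nil)

lemma getD_groupA (labels : List String) (lab : String) :
    (groupA labels).getD lab [] = pyIdxsOf labels lab := by
  unfold groupA pyIdxsOf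
  have hswap :
      ((PySem.List.enumerate labels).map Prod.swap).foldl
        (fun (d : PySem.Dict String (List Int)) (p : String × Int) =>
          d.modify p.1 [] (fun v => v ++ [p.2])) PySem.Dict.empty
      = (PySem.List.enumerate labels).foldl
        (fun d p => d.modify p.2 [] (fun v => v ++ [p.1])) PySem.Dict.empty := by
    rw [List.foldl_map]; simp
  rw [← hswap, PySem.Dict.getD_foldl_modify_append]
  simp [List.filter_map, Function.comp_def, PySem.Dict.getD_empty]

lemma items_groupA (labels : List String) :
    (groupA labels).items
      = (PySem.Set.ofList labels).map (fun k => (k, pyIdxsOf labels k)) := by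
  rw [PySem.Dict.items_eq_map_keys (groupA labels) (nodup_keys_groupA labels) []]
  rw [keys_groupA]
  exact List.map_congr_left (fun k _ => by rw [getD_groupA])

lemma distinct_eq (labels : List String) :
    labels.foldl (fun s lab => s.add lab) PySem.Set.empty = PySem.Set.ofList labels := by
  have h := PySem.Set.update_map_eq_foldl_add labels (fun x => x)
      (PySem.Set.empty : PySem.Set String)
  simp only [List.map_id_fun', id] at h
  rw [← h, PySem.Set.update_empty]

-- ===== VERDICT (by name: the statement is the Claim_ definition above) =====
-- the whole equality, stated let-free (definitionally equal to the ports' bodies)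
lemma ports_eq (labels : List String) :
    ((groupA labels).items,
     ((groupA labels).items.foldl
        (fun d pr =>
          (PySem.List.enumerate pr.2 1).foldl
            (fun d q => d.insert q.2 (generate_tag pr.1 q.1 (pr.2.length : Int))) d)
        (PySem.Dict.empty : PySem.Dict Int String)).items)
    = (((labels.foldl (fun s lab => s.add lab) PySem.Set.empty).foldl
          (fun st lab =>
            (st.1.insert lab (pyIdxsOf labels lab),
             (PySem.List.enumerate (pyIdxsOf labels lab) 1).foldl
               (fun d q => d.insert q.2 (generate_tag lab q.1 ((pyIdxsOf labels lab).length : Int))) st.2))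
          ((PySem.Dict.empty : PySem.Dict String (List Int)), (PySem.Dict.empty : PySem.Dict Int String))).1.items,
       ((labels.foldl (fun s lab => s.add lab) PySem.Set.empty).foldl
          (fun st lab =>
            (st.1.insert lab (pyIdxsOf labels lab),
             (PySem.List.enumerate (pyIdxsOf labels lab) 1).foldl
               (fun d q => d.insert q.2 (generate_tag lab q.1 ((pyIdxsOf labels lab).length : Int))) st.2))
          ((PySem.Dict.empty : PySem.Dict String (List Int)), (PySem.Dict.empty : PySem.Dict Int String))).2.items) := by
  rw [distinct_eq]
  have hsplit :
      (PySem.Set.ofList labels).foldl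
        (fun st lab =>
          (st.1.insert lab (pyIdxsOf labels lab),
           (PySem.List.enumerate (pyIdxsOf labels lab) 1).foldl
             (fun d q => d.insert q.2 (generate_tag lab q.1 ((pyIdxsOf labels lab).length : Int))) st.2))
        ((PySem.Dict.empty : PySem.Dict String (List Int)), (PySem.Dict.empty : PySem.Dict Int String))
      = ((PySem.Set.ofList labels).foldl
           (fun d1 lab => d1.insert lab (pyIdxsOf labels lab)) PySem.Dict.empty,
         (PySem.Set.ofList labels).foldl
           (fun d2 lab =>
             (PySem.List.enumerate (pyIdxsOf labels lab) 1).foldl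
               (fun d q => d.insert q.2 (generate_tag lab q.1 ((pyIdxsOf labels lab).length : Int))) d2)
           PySem.Dict.empty) :=
    PySem.List.foldl_prod_mk
      (fun d1 lab => d1.insert lab (pyIdxsOf labels lab))
      (fun d2 lab =>
        (PySem.List.enumerate (pyIdxsOf labels lab) 1).foldl
          (fun d q => d.insert q.2 (generate_tag lab q.1 ((pyIdxsOf labels lab).length : Int))) d2)
      (PySem.Set.ofList labels) PySem.Dict.empty PySem.Dict.empty
  rw [hsplit]
  have hfirst :
      ((PySem.Set.ofList labels).foldl
        (fun d1 lab => d1.insert lab (pyIdxsOf labels lab))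
        (PySem.Dict.empty : PySem.Dict String (List Int))).items
      = (PySem.Set.ofList labels).map (fun k => (k, pyIdxsOf labels k)) := by
    rw [PySem.Dict.items_foldl_insert_fresh (PySem.Set.ofList labels) (fun a => a)
        (fun a => pyIdxsOf labels a) PySem.Dict.empty
        (fun _ _ => PySem.Dict.contains_empty _)
        (by simp [PySem.Set.nodup_ofList labels])]
    rfl
  refine congrArg₂ Prod.mk ?_ ?_
  · rw [items_groupA, hfirst]
  · rw [items_groupA, List.foldl_map]

-- ===== VERDICT (by name: the statement is the Claim_ definition above) =====
theorem build_label_to_indices_spec : Claim_equal_build_label_to_indices :=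
  fun labels _ => ports_eq labels
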